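-- pv_equiv track=rewrite | github.com/Nitro-Carwash/AdventOfCode2024 | day09.py | defragmented_compression_sum
-- ===== SOURCE A (Python) =====
-- def defragmented_compression_sum(disk_map):
--     total = 0
--     original_disk = disk_map.copy()
--     right_pointer = len(disk_map) - 1 if len(disk_map) % 2 != 0 else len(disk_map) - 2
--
--     # Iterate from the right, trying to find a place to move each block as far left as possible.
--     # Add the file to the checksum if it can be moved
--     while right_pointer > 0:
--         file_size = disk_map[right_pointer]
--         if file_size > 0:
--             left_pointer = 1
--
--             # Try to find a place for this file
--             while left_pointer < right_pointer and disk_map[left_pointer] < file_size: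
--                 left_pointer += 2
--
--             # If a place was found, add it to the checksum from its new location and remove it from the disk_map
--             if left_pointer < right_pointer and disk_map[left_pointer] >= file_size:
--                 # index = sum of all blocks up to here, plus any free space here that has potentially already been used
--                 # in a previous move
--                 i = sum(original_disk[:left_pointer]) + original_disk[left_pointer] - disk_map[left_pointer]
--
--                 file_id = int((right_pointer / 2))
--                 total += calculate_block_checksum(i, file_size, file_id)
--                 disk_map[right_pointer] = 0
--                 # Only remove the amount of free space that was actually used
--                 disk_map[left_pointer] -= file_size
--
--         right_pointer -= 2
--
--     # Finally, accumulate all blocks that did not move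
--     left_pointer = 0
--     i = 0
--     while left_pointer < len(disk_map):
--         if left_pointer % 2 == 0:
--             block_size = disk_map[left_pointer]
--             file_id = int((left_pointer / 2))
--             total += calculate_block_checksum(i, block_size, file_id)
--
--         # Always use the original disk's block size to move the index because we have modified the disk_map
--         i += original_disk[left_pointer]
--         left_pointer += 1
--
--     return total
--
-- def calculate_block_checksum(block_start_index, file_size, file_id):
--     sum_of_indices = block_start_index * file_size + int(file_size * (file_size - 1) / 2)
--     return sum_of_indices * file_id
-- ===== SOURCE B (Python) =====
-- # B: same checksum, but the leftmost-fitting gap is found with a segment tree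
-- # (max remaining capacity per range) instead of rescanning the gap list for
-- # every file; positions come from one prefix-sum pass. Does not mutate disk_map.
--
-- def calculate_block_checksum(block_start_index, file_size, file_id):
--     sum_of_indices = block_start_index * file_size + int(file_size * (file_size - 1) / 2)
--     return sum_of_indices * file_id
--
--
-- def _build(caps, lo, hi):
--     if hi - lo == 1:
--         return ('leaf', caps[lo])
--     mid = (lo + hi) // 2
--     lt = _build(caps, lo, mid)
--     rt = _build(caps, mid, hi)
--     return ('node', max(lt[1], rt[1]), lt, rt)
--
--
-- def _query(t, lo, hi, bound, fs):
--     # leftmost index g in [lo, min(hi, bound)) with capacity(g) >= fs, else None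
--     if lo >= bound or t[1] < fs:
--         return None
--     if t[0] == 'leaf':
--         return lo
--     mid = (lo + hi) // 2
--     g = _query(t[2], lo, mid, bound, fs)
--     if g is not None:
--         return g
--     return _query(t[3], mid, hi, bound, fs)
--
--
-- def _update(t, lo, hi, g, fs):
--     if t[0] == 'leaf':
--         return ('leaf', t[1] - fs)
--     mid = (lo + hi) // 2
--     if g < mid:
--         lt = _update(t[2], lo, mid, g, fs)
--         rt = t[3]
--     else:
--         lt = t[2]
--         rt = _update(t[3], mid, hi, g, fs)
--     return ('node', max(lt[1], rt[1]), lt, rt)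
--
--
-- def defragmented_compression_sum(disk_map):
--     n = len(disk_map)
--     pos = [0]
--     for size in disk_map:
--         pos.append(pos[-1] + size)
--     caps = [disk_map[j] for j in range(1, n, 2)]   # gap g lives at disk index 2*g + 1
--     num_gaps = len(caps)
--     tree = _build(caps, 0, num_gaps) if num_gaps > 0 else None
--     used = [0] * num_gaps
--     num_files = (n + 1) // 2       # file f lives at disk index 2*f
--     moved = [False] * num_files
--     total = 0
--     for f in range(num_files - 1, 0, -1):
--         fs = disk_map[2 * f]
--         if fs > 0 and tree is not None:
--             g = _query(tree, 0, num_gaps, min(f, num_gaps), fs)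
--             if g is not None:
--                 total += calculate_block_checksum(pos[2 * g + 1] + used[g], fs, f)
--                 used[g] += fs
--                 moved[f] = True
--                 tree = _update(tree, 0, num_gaps, g, fs)
--     for f in range(num_files):
--         if not moved[f]:
--             total += calculate_block_checksum(pos[2 * f], disk_map[2 * f], f)
--     return total
-- ===== Notes on version B (the rewrite author's own statement) =====
-- stated objective: faster
-- what changed: B replaces A's per-file linear rescan of the gap list with a segment tree of remaining gap capacities (leftmost gap with capacity >= file size found by tree descent) and a single prefix-sum pass for block start indices, instead of A's repeated slice-sums and inner scans; B also does not mutate its argument.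
import Mathlib
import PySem

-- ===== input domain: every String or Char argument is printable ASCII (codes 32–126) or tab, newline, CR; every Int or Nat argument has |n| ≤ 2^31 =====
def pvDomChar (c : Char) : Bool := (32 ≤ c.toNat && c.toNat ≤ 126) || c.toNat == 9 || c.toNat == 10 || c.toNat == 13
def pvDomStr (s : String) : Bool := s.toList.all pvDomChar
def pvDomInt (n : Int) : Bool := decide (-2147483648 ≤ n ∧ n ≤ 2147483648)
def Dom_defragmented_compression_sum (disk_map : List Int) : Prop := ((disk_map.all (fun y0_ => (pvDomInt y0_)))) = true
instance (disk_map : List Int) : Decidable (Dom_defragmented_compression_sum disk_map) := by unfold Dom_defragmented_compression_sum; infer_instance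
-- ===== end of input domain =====

-- B replaces A's per-file linear rescans of the gap list by a segment tree of remaining gap
-- capacities plus one prefix-sum pass (O(n log n) instead of O(n^2)); same return value.
-- A mutates its argument list in place; B does not (the equivalence proved here is about the
-- return value only).

-- Shared model of Python float semantics: `float(x)` for 0 ≤ x (round to 53-bit significand,
-- ties to even). Both Pythons evaluate `int(file_size * (file_size - 1) / 2)` through a float;
-- both ports use the same model, exact for 0 ≤ x < 2^63 (and `x = s*(s-1)` is always ≥ 0).
def pyFloat53 (x : Int) : Int :=
  if x < 9007199254740992 then x
  else
    let e : Nat := PySem.Int.bitLength x - 53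
    let q : Int := x >>> e
    let r : Int := x - (q <<< e)
    let h : Int := (2 : Int) ^ (e - 1)
    let q' : Int := if r > h ∨ (r = h ∧ PySem.Int.mod q 2 = 1) then q + 1 else q
    q' <<< e

-- `int(x / 2)` for 0 ≤ x: Python rounds x to a float, then halves it exactly.
def pyIntHalf (x : Int) : Int := pyFloat53 x / 2

-- ===== PORT A =====

def calculate_block_checksum (block_start_index file_size file_id : Int) : Int :=
  (block_start_index * file_size + pyIntHalf (file_size * (file_size - 1))) * file_id

-- inner `while left_pointer < right_pointer and disk_map[left_pointer] < file_size`
def dcsScan (dm : List Int) (rp fs left : Int) : Int :=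
  if _h : left < rp ∧ PySem.List.pyGetD dm left 0 < fs then dcsScan dm rp fs (left + 2)
  else left
termination_by (rp - left).toNat
decreasing_by omega

-- outer `while right_pointer > 0` loop; returns the mutated disk_map and the running total
def dcsLoop1 (orig dm : List Int) (rp total : Int) : List Int × Int :=
  if _h : rp > 0 then
    let file_size := PySem.List.pyGetD dm rp 0
    if file_size > 0 then
      let left := dcsScan dm rp file_size 1
      if left < rp ∧ file_size ≤ PySem.List.pyGetD dm left 0 then
        let i := (PySem.List.slice orig (some 0) (some left)).sum
                   + PySem.List.pyGetD orig left 0 - PySem.List.pyGetD dm left 0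
        let file_id := PySem.Int.truncdiv rp 2   -- int(right_pointer / 2)
        let total' := total + calculate_block_checksum i file_size file_id
        let dm' := PySem.List.pySetD dm rp 0
        let dm'' := PySem.List.pySetD dm' left (PySem.List.pyGetD dm' left 0 - file_size)
        dcsLoop1 orig dm'' (rp - 2) total'
      else dcsLoop1 orig dm (rp - 2) total
    else dcsLoop1 orig dm (rp - 2) total
  else (dm, total)
termination_by rp.toNat
decreasing_by all_goals omega

-- final `while left_pointer < len(disk_map)` accumulation loop
def dcsLoop2 (orig dm : List Int) (total i left : Int) : Int :=
  if _h : left < PySem.List.len dm then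
    let total' :=
      if PySem.Int.mod left 2 = 0 then
        total + calculate_block_checksum i (PySem.List.pyGetD dm left 0) (PySem.Int.truncdiv left 2)
      else total
    dcsLoop2 orig dm total' (i + PySem.List.pyGetD orig left 0) (left + 1)
  else total
termination_by (PySem.List.len dm - left).toNat
decreasing_by simp [PySem.List.len] at *; omega

def defragmented_compression_sum (disk_map : List Int) : Int :=
  let original_disk := disk_map
  let rp : Int :=
    if PySem.Int.mod (PySem.List.len disk_map) 2 ≠ 0 then PySem.List.len disk_map - 1
    else PySem.List.len disk_map - 2
  let res := dcsLoop1 original_disk disk_map rp 0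
  dcsLoop2 original_disk res.1 res.2 0 0

-- ===== PORT B =====

def calcChecksumB (block_start_index file_size file_id : Int) : Int :=
  (block_start_index * file_size + pyIntHalf (file_size * (file_size - 1))) * file_id

-- segment tree over the gap capacities (max of remaining capacity per range)
inductive GTree where
  | leaf (cap : Int)
  | node (mx : Int) (l r : GTree)
deriving Repr

def GTree.mx : GTree → Int
  | .leaf c => c
  | .node m _ _ => m

def bBuild (caps : List Int) (lo hi : Int) : GTree :=
  if _h : hi - lo ≤ 1 then GTree.leaf (PySem.List.pyGetD caps lo 0)  -- Python: hi - lo == 1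
  else
    let mid := PySem.Int.floordiv (lo + hi) 2
    let lt := bBuild caps lo mid
    let rt := bBuild caps mid hi
    GTree.node (max lt.mx rt.mx) lt rt
termination_by (hi - lo).toNat
decreasing_by
  all_goals
    rw [PySem.Int.floordiv_eq_ediv_of_pos (by omega : (0:Int) < 2)]
    omega

-- leftmost index g in [lo, min(hi, bound)) whose capacity is ≥ fs, else none
def bQuery (t : GTree) (lo hi bound fs : Int) : Option Int :=
  match t with
  | .leaf c => if lo ≥ bound ∨ c < fs then none else some lo
  | .node m l r =>
    if lo ≥ bound ∨ m < fs then none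
    else
      let mid := PySem.Int.floordiv (lo + hi) 2
      match bQuery l lo mid bound fs with
      | some g => some g
      | none => bQuery r mid hi bound fs

def bUpdate (t : GTree) (lo hi g fs : Int) : GTree :=
  match t with
  | .leaf c => .leaf (c - fs)
  | .node _ l r =>
    let mid := PySem.Int.floordiv (lo + hi) 2
    if g < mid then
      let lt := bUpdate l lo mid g fs
      .node (max lt.mx r.mx) lt r
    else
      let rt := bUpdate r mid hi g fs
      .node (max l.mx rt.mx) l rt

-- one step of B's main loop: state = (tree, used, moved, total), f = current file id
def bStep (disk_map pos : List Int) (numGaps : Int)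
    (st : Option GTree × List Int × List Bool × Int) (f : Int) :
    Option GTree × List Int × List Bool × Int :=
  let fs := PySem.List.pyGetD disk_map (2 * f) 0
  if fs > 0 then
    match st.1 with
    | none => st
    | some t =>
      match bQuery t 0 numGaps (min f numGaps) fs with
      | none => st
      | some g =>
        let total' := st.2.2.2 +
          calcChecksumB (PySem.List.pyGetD pos (2 * g + 1) 0 + PySem.List.pyGetD st.2.1 g 0) fs f
        let used' := PySem.List.pySetD st.2.1 g (PySem.List.pyGetD st.2.1 g 0 + fs)
        let moved' := PySem.List.pySetD st.2.2.1 f true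
        (some (bUpdate t 0 numGaps g fs), used', moved', total')
  else st

def defragmented_compression_sum_alt (disk_map : List Int) : Int :=
  let n : Int := PySem.List.len disk_map
  let pos : List Int :=
    disk_map.foldl (fun acc size => acc ++ [PySem.List.pyGetD acc (-1) 0 + size]) [0]
  let caps : List Int := (PySem.List.pyRange 1 n 2).map (fun j => PySem.List.pyGetD disk_map j 0)
  let numGaps : Int := PySem.List.len caps
  let tree : Option GTree := if numGaps > 0 then some (bBuild caps 0 numGaps) else none
  let used : List Int := List.replicate numGaps.toNat 0
  let numFiles : Int := PySem.Int.floordiv (n + 1) 2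
  let moved : List Bool := List.replicate numFiles.toNat false
  let st := (PySem.List.pyRange (numFiles - 1) 0 (-1)).foldl
      (bStep disk_map pos numGaps) (tree, used, moved, 0)
  (PySem.List.pyRange 0 numFiles 1).foldl
    (fun total f =>
      if PySem.List.pyGetD st.2.2.1 f false = false then
        total + calcChecksumB (PySem.List.pyGetD pos (2 * f) 0)
                  (PySem.List.pyGetD disk_map (2 * f) 0) f
      else total)
    st.2.2.2

-- ===== PRECONDITION & SPEC =====
def Spec_defragmented_compression_sum (disk_map : List Int) (out : Int) : Prop := out = defragmented_compression_sum_alt disk_map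
instance (disk_map : List Int) (out : Int) : Decidable (Spec_defragmented_compression_sum disk_map out) := by unfold Spec_defragmented_compression_sum; infer_instance

-- ===== CLAIM (what is proved, stated in full; the proofs are below) =====
def Claim_equal_defragmented_compression_sum : Prop := ∀ (disk_map : List Int), Dom_defragmented_compression_sum disk_map → Spec_defragmented_compression_sum disk_map (defragmented_compression_sum disk_map)

-- ===== LEMMAS AND PROOFS =====

-- ---------- generic helpers ----------

def aPrefix (orig : List Int) (j : Nat) : Int := (orig.take j).sum

def capsF (dm : List Int) (g : Int) : Int := PySem.List.pyGetD dm (2 * g + 1) 0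

lemma aPrefix_succ (orig : List Int) (j : Nat) :
    aPrefix orig (j + 1) = aPrefix orig j + orig.getD j 0 := by
  unfold aPrefix
  rw [List.take_succ, List.getD_eq_getElem?_getD]
  cases orig[j]? <;> simp

lemma calc_size_zero (i fid : Int) : calculate_block_checksum i 0 fid = 0 := by
  norm_num [calculate_block_checksum, pyIntHalf, pyFloat53]

lemma calcB_eq_calcA : calcChecksumB = calculate_block_checksum := rfl

-- ---------- the prefix-sum list built by B ----------

def mySums : Int → List Int → List Int
  | _, [] => []
  | a, x :: xs => (a + x) :: mySums (a + x) xs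

lemma posFold_eq (xs : List Int) : ∀ (acc : List Int) (x0 : List Int) (v : Int),
    acc = x0 ++ [v] →
    xs.foldl (fun acc size => acc ++ [PySem.List.pyGetD acc (-1) 0 + size]) acc
      = acc ++ mySums v xs := by
  induction xs with
  | nil => simp [mySums]
  | cons x xs ih =>
    intro acc x0 v hacc
    subst hacc
    rw [List.foldl_cons, PySem.List.pyGetD_neg_one_append_singleton,
      ih (x0 ++ [v] ++ [v + x]) (x0 ++ [v]) (v + x) rfl]
    simp [mySums]

lemma mySums_getD (xs : List Int) : ∀ (a : Int) (j : Nat), j < xs.length →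
    (mySums a xs).getD j 0 = a + (xs.take (j + 1)).sum := by
  induction xs with
  | nil => intro a j hj; simp at hj
  | cons x xs ih =>
    intro a j hj
    cases j with
    | zero => simp [mySums]
    | succ j =>
      simp only [mySums, List.getD_cons_succ, List.take_succ_cons, List.sum_cons]
      rw [ih (a + x) j (by simpa using hj)]
      ring

lemma pos_getD (orig : List Int) (j : Nat) (hj : j ≤ orig.length) :
    PySem.List.pyGetD
      (orig.foldl (fun acc size => acc ++ [PySem.List.pyGetD acc (-1) 0 + size]) [0])
      (j : Int) 0 = aPrefix orig j := by
  rw [posFold_eq orig [0] [] 0 rfl, PySem.List.pyGetD_natCast]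
  cases j with
  | zero => simp [aPrefix]
  | succ j =>
    have hj' : j < orig.length := by omega
    simpa [aPrefix, mySums_getD orig 0 j hj'] using (mySums_getD orig 0 j hj')

-- ---------- the capacity list built by B ----------

lemma caps_length (orig : List Int) :
    ((PySem.List.pyRange 1 (orig.length : Int) 2).map
      (fun j => PySem.List.pyGetD orig j 0)).length = orig.length / 2 := by
  rw [PySem.List.pyRange_of_pos 1 (orig.length : Int) (by norm_num)]
  simp only [List.length_map, List.length_range]
  split_ifs with h <;> omega

lemma caps_getD (orig : List Int) (g : Nat) (hg : g < orig.length / 2) :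
    PySem.List.pyGetD
      ((PySem.List.pyRange 1 (orig.length : Int) 2).map (fun j => PySem.List.pyGetD orig j 0))
      (g : Int) 0 = capsF orig (g : Int) := by
  rw [PySem.List.pyRange_of_pos 1 (orig.length : Int) (by norm_num), List.map_map,
    PySem.List.pyGetD_natCast, List.getD_eq_getElem?_getD, List.getElem?_map,
    List.getElem?_range (by split_ifs with h <;> omega : g < if 1 < (orig.length : Int) then (((orig.length : Int) - 1 + 2 - 1) / 2).toNat else 0)]
  unfold capsF
  simp only [Option.map_some, Option.getD_some, Function.comp_apply]
  ring_nf

-- ---------- segment tree: meaning ----------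

def Models : GTree → Int → Int → (Int → Int) → Prop
  | .leaf c, lo, hi, F => hi = lo + 1 ∧ c = F lo
  | .node m l r, lo, hi, F =>
      lo + 1 < hi ∧ Models l lo (PySem.Int.floordiv (lo + hi) 2) F ∧
        Models r (PySem.Int.floordiv (lo + hi) 2) hi F ∧ m = max l.mx r.mx

lemma models_lt (t : GTree) (lo hi : Int) (F : Int → Int) (h : Models t lo hi F) :
    lo < hi := by
  cases t with
  | leaf c => rcases h with ⟨h1, _⟩; omega
  | node m l r => rcases h with ⟨h1, _⟩; omega

lemma models_congr (t : GTree) (lo hi : Int) (F F' : Int → Int) (h : Models t lo hi F)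
    (hagree : ∀ x, lo ≤ x → x < hi → F x = F' x) : Models t lo hi F' := by
  induction t generalizing lo hi with
  | leaf c =>
    rcases h with ⟨h1, h2⟩
    exact ⟨h1, h2.trans (hagree lo le_rfl (by omega))⟩
  | node m l r ihl ihr =>
    rcases h with ⟨h1, hl, hr, hm⟩
    have hml := models_lt _ _ _ _ hl
    have hmr := models_lt _ _ _ _ hr
    exact ⟨h1, ihl _ _ hl (fun x hx1 hx2 => hagree x hx1 (by omega)),
      ihr _ _ hr (fun x hx1 hx2 => hagree x (by omega) hx2), hm⟩

lemma models_mx (t : GTree) (lo hi : Int) (F : Int → Int) (h : Models t lo hi F) :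
    ∀ g, lo ≤ g → g < hi → F g ≤ t.mx := by
  induction t generalizing lo hi with
  | leaf c =>
    rcases h with ⟨h1, h2⟩
    intro g hg1 hg2
    have : g = lo := by omega
    subst this
    simp [GTree.mx, h2]
  | node m l r ihl ihr =>
    rcases h with ⟨h1, hl, hr, hm⟩
    intro g hg1 hg2
    have hml := models_lt _ _ _ _ hl
    have hmr := models_lt _ _ _ _ hr
    by_cases hc : g < PySem.Int.floordiv (lo + hi) 2
    · exact le_trans (ihl _ _ hl g hg1 hc) (by simp [GTree.mx, hm])
    · exact le_trans (ihr _ _ hr g (by omega) hg2) (by simp [GTree.mx, hm])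

lemma bBuild_models (caps : List Int) : ∀ (k : Nat) (lo hi : Int), (hi - lo).toNat = k →
    lo < hi → Models (bBuild caps lo hi) lo hi (fun g => PySem.List.pyGetD caps g 0) := by
  intro k
  induction k using Nat.strong_induction_on with
  | _ k ih =>
    intro lo hi hk hlt
    rw [bBuild]
    split
    · next h1 =>
      have : hi = lo + 1 := by omega
      exact ⟨this, rfl⟩
    · next h1 =>
      have hmid : PySem.Int.floordiv (lo + hi) 2 = (lo + hi) / 2 :=
        PySem.Int.floordiv_eq_ediv_of_pos (by omega)
      refine ⟨by omega, ?_, ?_, rfl⟩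
      · exact ih ((PySem.Int.floordiv (lo + hi) 2) - lo).toNat (by omega) lo _ rfl (by omega)
      · exact ih (hi - (PySem.Int.floordiv (lo + hi) 2)).toNat (by omega) _ hi rfl (by omega)

-- ---------- linear first-fit (the reference both sides are reduced to) ----------

def firstFit (F : Int → Int) (lo hi fs : Int) : Option Int :=
  if _h : lo < hi then
    if fs ≤ F lo then some lo else firstFit F (lo + 1) hi fs
  else none
termination_by (hi - lo).toNat
decreasing_by omega

lemma firstFit_nil (F : Int → Int) (lo hi fs : Int) (h : hi ≤ lo) :
    firstFit F lo hi fs = none := by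
  rw [firstFit]
  simp [show ¬ lo < hi by omega]

lemma firstFit_none_of_lt (F : Int → Int) (fs : Int) : ∀ (k : Nat) (lo hi : Int),
    (hi - lo).toNat = k → (∀ g, lo ≤ g → g < hi → F g < fs) →
    firstFit F lo hi fs = none := by
  intro k
  induction k using Nat.strong_induction_on with
  | _ k ih =>
    intro lo hi hk hall
    rw [firstFit]
    split
    · next hlt =>
      rw [if_neg (by have := hall lo le_rfl hlt; omega)]
      exact ih (hi - (lo + 1)).toNat (by omega) _ _ rfl
        (fun g hg1 hg2 => hall g (by omega) hg2)
    · rfl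

lemma firstFit_some (F : Int → Int) (fs : Int) : ∀ (k : Nat) (lo hi g : Int),
    (hi - lo).toNat = k → firstFit F lo hi fs = some g →
    lo ≤ g ∧ g < hi ∧ fs ≤ F g := by
  intro k
  induction k using Nat.strong_induction_on with
  | _ k ih =>
    intro lo hi g hk hff
    rw [firstFit] at hff
    split at hff
    · next hlt =>
      split at hff
      · next hle => cases hff; exact ⟨le_rfl, hlt, hle⟩
      · have := ih (hi - (lo + 1)).toNat (by omega) _ _ _ rfl hff
        exact ⟨by omega, this.2.1, this.2.2⟩
    · cases hff

lemma firstFit_split (F : Int → Int) (fs : Int) : ∀ (k : Nat) (lo mid hi : Int),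
    (mid - lo).toNat = k → lo ≤ mid → mid ≤ hi →
    firstFit F lo hi fs =
      (match firstFit F lo mid fs with
       | some g => some g
       | none => firstFit F mid hi fs) := by
  intro k
  induction k using Nat.strong_induction_on with
  | _ k ih =>
    intro lo mid hi hk h1 h2
    by_cases hlm : lo < mid
    · rw [firstFit, dif_pos (show lo < hi by omega)]
      conv_rhs => rw [firstFit, dif_pos hlm]
      by_cases hle : fs ≤ F lo
      · simp [hle]
      · simp only [if_neg hle]
        exact ih (mid - (lo + 1)).toNat (by omega) _ _ _ rfl (by omega) h2
    · have : lo = mid := by omega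
      subst this
      rw [firstFit_nil F lo lo fs le_rfl]

lemma bQuery_correct (fs : Int) : ∀ (t : GTree) (lo hi bound : Int) (F : Int → Int),
    Models t lo hi F → bQuery t lo hi bound fs = firstFit F lo (min hi bound) fs := by
  intro t
  induction t with
  | leaf c =>
    intro lo hi bound F h
    rcases h with ⟨h1, h2⟩
    subst h2
    simp only [bQuery]
    by_cases hb : lo ≥ bound
    · rw [if_pos (Or.inl hb), firstFit_nil _ _ _ _ (by omega)]
    · by_cases hc : F lo < fs
      · rw [if_pos (Or.inr hc), firstFit, dif_pos (by omega : lo < min hi bound),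
          if_neg (by omega : ¬ fs ≤ F lo), firstFit_nil _ _ _ _ (by omega)]
      · rw [if_neg (by tauto), firstFit, dif_pos (by omega : lo < min hi bound),
          if_pos (by omega : fs ≤ F lo)]
  | node m l r ihl ihr =>
    intro lo hi bound F h
    have hmx := models_mx _ _ _ _ h
    rcases h with ⟨h1, hl, hr, hm⟩
    have hml := models_lt _ _ _ _ hl
    have hmr := models_lt _ _ _ _ hr
    simp only [bQuery]
    by_cases hb : lo ≥ bound
    · rw [if_pos (Or.inl hb), firstFit_nil _ _ _ _ (by omega)]
    · by_cases hmfs : m < fs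
      · rw [if_pos (Or.inr hmfs),
          firstFit_none_of_lt F fs (min hi bound - lo).toNat lo (min hi bound) rfl
            (fun g hg1 hg2 => lt_of_le_of_lt
              (by simpa [GTree.mx] using hmx g hg1 (by omega)) hmfs)]
      · rw [if_neg (by tauto)]
        rw [ihl lo _ bound F hl, ihr _ hi bound F hr]
        by_cases hbm : bound ≤ PySem.Int.floordiv (lo + hi) 2
        · have e1 : min (PySem.Int.floordiv (lo + hi) 2) bound = bound := by omega
          have e2 : min hi bound = bound := by omega
          rw [e1, e2]
          cases hf : firstFit F lo bound fs with
          | some g => rfl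
          | none => exact firstFit_nil _ _ _ _ (by omega)
        · have e1 : min (PySem.Int.floordiv (lo + hi) 2) bound
              = PySem.Int.floordiv (lo + hi) 2 := by omega
          rw [e1, firstFit_split F fs (PySem.Int.floordiv (lo + hi) 2 - lo).toNat lo
            (PySem.Int.floordiv (lo + hi) 2) (min hi bound) rfl (by omega) (by omega)]

lemma bUpdate_models (fs : Int) : ∀ (t : GTree) (lo hi g : Int) (F : Int → Int),
    Models t lo hi F → lo ≤ g → g < hi →
    Models (bUpdate t lo hi g fs) lo hi (fun x => if x = g then F x - fs else F x) := by
  intro t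
  induction t with
  | leaf c =>
    intro lo hi g F h hg1 hg2
    rcases h with ⟨h1, h2⟩
    have hg : g = lo := by omega
    subst hg
    exact ⟨h1, by simp [h2]⟩
  | node m l r ihl ihr =>
    intro lo hi g F h hg1 hg2
    rcases h with ⟨h1, hl, hr, hm⟩
    have hml := models_lt _ _ _ _ hl
    have hmr := models_lt _ _ _ _ hr
    simp only [bUpdate]
    by_cases hgm : g < PySem.Int.floordiv (lo + hi) 2
    · rw [if_pos hgm]
      exact ⟨h1, ihl _ _ _ _ hl hg1 hgm,
        models_congr _ _ _ _ _ hr (fun x hx1 hx2 => by simp [show ¬ x = g by omega]), rfl⟩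
    · rw [if_neg hgm]
      exact ⟨h1,
        models_congr _ _ _ _ _ hl (fun x hx1 hx2 => by simp [show ¬ x = g by omega]),
        ihr _ _ _ _ hr (by omega) hg2, rfl⟩

-- ---------- A's inner scan is first-fit over the gap capacities ----------

lemma dcsScan_some (dm : List Int) (fs : Int) : ∀ (k : Nat) (f g0 : Nat) (g : Int), f - g0 = k →
    firstFit (capsF dm) (g0 : Int) (f : Int) fs = some g →
    dcsScan dm (2 * (f : Int)) fs (2 * (g0 : Int) + 1) = 2 * g + 1 := by
  intro k
  induction k using Nat.strong_induction_on with
  | _ k ih =>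
    intro f g0 g hk hff
    rw [firstFit] at hff
    by_cases hgf : g0 < f
    · rw [dif_pos (by exact_mod_cast hgf)] at hff
      by_cases hcap : fs ≤ capsF dm (g0 : Int)
      · rw [if_pos hcap] at hff
        cases hff
        rw [dcsScan, dif_neg (by unfold capsF at hcap; push_neg; intro _; omega)]
      · rw [if_neg hcap] at hff
        rw [dcsScan, dif_pos ⟨by push_cast; omega, by unfold capsF at hcap; omega⟩]
        have hc1 : (g0 : Int) + 1 = ((g0 + 1 : Nat) : Int) := by push_cast; ring
        have hc2 : 2 * (g0 : Int) + 1 + 2 = 2 * ((g0 + 1 : Nat) : Int) + 1 := by push_cast; ring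
        rw [hc1] at hff
        rw [hc2]
        exact ih (f - (g0 + 1)) (by omega) f (g0 + 1) g rfl hff
    · rw [dif_neg (by exact_mod_cast hgf)] at hff
      cases hff
lemma dcsScan_none (dm : List Int) (fs : Int) : ∀ (k : Nat) (f g0 : Nat), f - g0 = k →
    firstFit (capsF dm) (g0 : Int) (f : Int) fs = none →
    2 * (f : Int) ≤ dcsScan dm (2 * (f : Int)) fs (2 * (g0 : Int) + 1) := by
  intro k
  induction k using Nat.strong_induction_on with
  | _ k ih =>
    intro f g0 hk hff
    rw [firstFit] at hff
    by_cases hgf : g0 < f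
    · rw [dif_pos (by exact_mod_cast hgf)] at hff
      by_cases hcap : fs ≤ capsF dm (g0 : Int)
      · rw [if_pos hcap] at hff; cases hff
      · rw [if_neg hcap] at hff
        rw [dcsScan, dif_pos ⟨by push_cast; omega, by unfold capsF at hcap; omega⟩]
        have hc1 : (g0 : Int) + 1 = ((g0 + 1 : Nat) : Int) := by push_cast; ring
        have hc2 : 2 * (g0 : Int) + 1 + 2 = 2 * ((g0 + 1 : Nat) : Int) + 1 := by push_cast; ring
        rw [hc1] at hff
        rw [hc2]
        exact ih (f - (g0 + 1)) (by omega) f (g0 + 1) rfl hff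
    · rw [dcsScan, dif_neg (by push_neg; intro h1; exfalso; push_cast at h1; omega)]
      push_cast
      omega

-- ---------- final accumulation, on both sides ----------

def eTailA (orig dm : List Int) (k : Nat) : Int :=
  if k < (orig.length + 1) / 2 then
    calculate_block_checksum (aPrefix orig (2 * k)) (dm.getD (2 * k) 0) (k : Int)
      + eTailA orig dm (k + 1)
  else 0
termination_by (orig.length + 1) / 2 - k

def eTailB (orig : List Int) (moved : List Bool) (k : Nat) : Int :=
  if k < (orig.length + 1) / 2 then
    (if moved.getD k false then 0
     else calculate_block_checksum (aPrefix orig (2 * k)) (orig.getD (2 * k) 0) (k : Int))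
      + eTailB orig moved (k + 1)
  else 0
termination_by (orig.length + 1) / 2 - k

lemma dcsLoop2_eval (orig dm : List Int) (hlen : dm.length = orig.length) :
    ∀ (m k : Nat) (total : Int), (orig.length + 1) / 2 - k = m →
    dcsLoop2 orig dm total (aPrefix orig (2 * k)) (2 * (k : Int)) = total + eTailA orig dm k := by
  intro m
  induction m using Nat.strong_induction_on with
  | _ m ih =>
    intro k total hm
    by_cases hk : k < (orig.length + 1) / 2
    · have hg1 : 2 * (k : Int) < PySem.List.len dm := by
        rw [PySem.List.len_eq, hlen]; omega
      have hmod : PySem.Int.mod (2 * (k : Int)) 2 = 0 := by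
        rw [PySem.Int.mod_eq_emod_of_pos (by norm_num)]
        omega
      have htd : PySem.Int.truncdiv (2 * (k : Int)) 2 = (k : Int) := by
        unfold PySem.Int.truncdiv
        rw [show 2 * (k : Int) = (k : Int) * 2 by ring]
        exact Int.mul_tdiv_cancel _ (by norm_num)
      have hgetdm : PySem.List.pyGetD dm (2 * (k : Int)) 0 = dm.getD (2 * k) 0 := by
        rw [show (2 * (k : Int)) = ((2 * k : Nat) : Int) by push_cast; ring,
          PySem.List.pyGetD_natCast]
      have hgetor : PySem.List.pyGetD orig (2 * (k : Int)) 0 = orig.getD (2 * k) 0 := by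
        rw [show (2 * (k : Int)) = ((2 * k : Nat) : Int) by push_cast; ring,
          PySem.List.pyGetD_natCast]
      rw [dcsLoop2, dif_pos hg1]
      simp only [hmod, htd, hgetdm, hgetor, if_pos]
      have hi1 : aPrefix orig (2 * k) + orig.getD (2 * k) 0 = aPrefix orig (2 * k + 1) :=
        (aPrefix_succ orig (2 * k)).symm
      rw [hi1]
      by_cases hk2 : 2 * k + 1 < orig.length
      · have hg2 : 2 * (k : Int) + 1 < PySem.List.len dm := by
          rw [PySem.List.len_eq, hlen]; omega
        have hmod2 : ¬ PySem.Int.mod (2 * (k : Int) + 1) 2 = 0 := by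
          rw [PySem.Int.mod_eq_emod_of_pos (by norm_num)]
          omega
        have hgetor2 : PySem.List.pyGetD orig (2 * (k : Int) + 1) 0 = orig.getD (2 * k + 1) 0 := by
          rw [show (2 * (k : Int) + 1) = ((2 * k + 1 : Nat) : Int) by push_cast; ring,
            PySem.List.pyGetD_natCast]
        rw [dcsLoop2, dif_pos hg2]
        simp only [hmod2, if_neg, ite_false, hgetor2]
        have hi2 : aPrefix orig (2 * k + 1) + orig.getD (2 * k + 1) 0 = aPrefix orig (2 * (k + 1)) := by
          rw [show 2 * (k + 1) = 2 * k + 1 + 1 by ring]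
          exact (aPrefix_succ orig (2 * k + 1)).symm
        have hl2 : 2 * (k : Int) + 1 + 1 = 2 * ((k + 1 : Nat) : Int) := by push_cast; ring
        rw [hi2, hl2, ih ((orig.length + 1) / 2 - (k + 1)) (by omega) (k + 1) _ rfl]
        conv_rhs => rw [eTailA, if_pos hk]
        ring
      · have hg2 : ¬ 2 * (k : Int) + 1 < PySem.List.len dm := by
          rw [PySem.List.len_eq, hlen]; omega
        rw [dcsLoop2, dif_neg hg2]
        conv_rhs => rw [eTailA, if_pos hk, eTailA, if_neg (by omega)]
        ring
    · have hg1 : ¬ 2 * (k : Int) < PySem.List.len dm := by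
        rw [PySem.List.len_eq, hlen]; omega
      rw [dcsLoop2, dif_neg hg1, eTailA, if_neg hk]
      ring

lemma eTailA_eq_eTailB (orig dm : List Int) (moved : List Bool)
    (hdm : ∀ k : Nat, dm.getD (2 * k) 0 = (if moved.getD k false then 0 else orig.getD (2 * k) 0)) :
    ∀ (m k : Nat), (orig.length + 1) / 2 - k = m → eTailA orig dm k = eTailB orig moved k := by
  intro m
  induction m using Nat.strong_induction_on with
  | _ m ih =>
    intro k hm
    rw [eTailA, eTailB]
    by_cases hk : k < (orig.length + 1) / 2
    · rw [if_pos hk, if_pos hk, ih ((orig.length + 1) / 2 - (k + 1)) (by omega) (k + 1) rfl,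
        hdm k]
      by_cases hmk : moved.getD k false
      · rw [if_pos hmk, if_pos hmk, calc_size_zero]
      · rw [if_neg hmk, if_neg hmk]
    · rw [if_neg hk, if_neg hk]

def bFinish (orig pos : List Int) (st : Option GTree × List Int × List Bool × Int) : Int :=
  (PySem.List.pyRange 0 ((((orig.length + 1) / 2 : Nat) : Int)) 1).foldl
    (fun total f =>
      if PySem.List.pyGetD st.2.2.1 f false = false then
        total + calcChecksumB (PySem.List.pyGetD pos (2 * f) 0)
                  (PySem.List.pyGetD orig (2 * f) 0) f
      else total)
    st.2.2.2

lemma bFinish_eval (orig pos : List Int)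
    (hpos : ∀ j : Nat, j ≤ orig.length → PySem.List.pyGetD pos (j : Int) 0 = aPrefix orig j)
    (t? : Option GTree) (used : List Int) (moved : List Bool) (total : Int) :
    bFinish orig pos (t?, used, moved, total) = total + eTailB orig moved 0 := by
  have aux : ∀ (m k : Nat), (orig.length + 1) / 2 - k = m → k ≤ (orig.length + 1) / 2 →
      ∀ (tot : Int),
      (PySem.List.pyRange (k : Int) (((orig.length + 1) / 2 : Nat) : Int) 1).foldl
        (fun total f =>
          if PySem.List.pyGetD moved f false = false then
            total + calcChecksumB (PySem.List.pyGetD pos (2 * f) 0)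
                      (PySem.List.pyGetD orig (2 * f) 0) f
          else total) tot = tot + eTailB orig moved k := by
    intro m
    induction m using Nat.strong_induction_on with
    | _ m ih =>
      intro k hm hk tot
      by_cases hlt : k < (orig.length + 1) / 2
      · rw [PySem.List.pyRange_one_cons (by exact_mod_cast hlt), List.foldl_cons]
        have hmov : PySem.List.pyGetD moved (k : Int) false = moved.getD k false :=
          PySem.List.pyGetD_natCast moved k false
        have hpos2 : PySem.List.pyGetD pos (2 * (k : Int)) 0 = aPrefix orig (2 * k) := by
          rw [show (2 * (k : Int)) = ((2 * k : Nat) : Int) by push_cast; ring]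
          exact hpos (2 * k) (by omega)
        have horig2 : PySem.List.pyGetD orig (2 * (k : Int)) 0 = orig.getD (2 * k) 0 := by
          rw [show (2 * (k : Int)) = ((2 * k : Nat) : Int) by push_cast; ring,
            PySem.List.pyGetD_natCast]
        have hcast : (k : Int) + 1 = ((k + 1 : Nat) : Int) := by push_cast; ring
        rw [hmov, hpos2, horig2, hcast,
          ih ((orig.length + 1) / 2 - (k + 1)) (by omega) (k + 1) rfl (by omega)]
        conv_rhs => rw [eTailB, if_pos hlt]
        rw [calcB_eq_calcA]
        by_cases hmk : moved.getD k false
        · rw [if_neg (by rw [hmk]; simp), if_pos hmk]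
          ring
        · rw [if_pos ((Bool.not_eq_true _).mp hmk), if_neg hmk]
          ring
      · have hke : k = (orig.length + 1) / 2 := by omega
        subst hke
        rw [PySem.List.pyRange_one_eq_nil (by omega), List.foldl_nil, eTailB,
          if_neg (by omega)]
        ring
  have := aux ((orig.length + 1) / 2) 0 (by omega) (by omega) total
  simpa [bFinish] using this

-- ---------- the main loop correspondence ----------

lemma main_loop (orig pos : List Int)
    (hpos : ∀ j : Nat, j ≤ orig.length → PySem.List.pyGetD pos (j : Int) 0 = aPrefix orig j) :
    ∀ (f : Nat), f < (orig.length + 1) / 2 → f ≤ orig.length / 2 →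
    ∀ (dm : List Int) (t : GTree) (used : List Int) (moved : List Bool) (total : Int),
    dm.length = orig.length →
    Models t 0 ((orig.length / 2 : Nat) : Int) (capsF dm) →
    used.length = orig.length / 2 →
    (∀ g : Nat, g < orig.length / 2 →
      used.getD g 0 = PySem.List.pyGetD orig (2 * (g : Int) + 1) 0 - capsF dm (g : Int)) →
    (∀ k : Nat, k ≤ f → dm.getD (2 * k) 0 = orig.getD (2 * k) 0) →
    moved.length = (orig.length + 1) / 2 →
    (∀ k : Nat, f < k → dm.getD (2 * k) 0 = (if moved.getD k false then 0 else orig.getD (2 * k) 0)) →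
    (∀ k : Nat, k ≤ f → moved.getD k false = false) →
    dcsLoop2 orig (dcsLoop1 orig dm (2 * (f : Int)) total).1 (dcsLoop1 orig dm (2 * (f : Int)) total).2 0 0
      = bFinish orig pos
          ((PySem.List.pyRange (f : Int) 0 (-1)).foldl
            (bStep orig pos ((orig.length / 2 : Nat) : Int)) (some t, used, moved, total)) := by
  intro f
  induction f with
  | zero =>
    intro _ _ dm t used moved total hlen hmod hulen hused h4 hmlen h6 h7
    have hdm : ∀ k : Nat, dm.getD (2 * k) 0
        = (if moved.getD k false then 0 else orig.getD (2 * k) 0) := by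
      intro k
      cases k with
      | zero => rw [h7 0 le_rfl, h4 0 le_rfl, if_neg (by simp)]
      | succ k => exact h6 (k + 1) (by omega)
    rw [show (2 * ((0 : Nat) : Int)) = 2 * ((0 : Nat) : Int) from rfl]
    rw [dcsLoop1, dif_neg (by norm_num)]
    have he := dcsLoop2_eval orig dm hlen ((orig.length + 1) / 2) 0 total (by omega)
    simp only [Nat.mul_zero, Nat.cast_zero, mul_zero] at he ⊢
    rw [show aPrefix orig 0 = 0 from rfl] at he
    rw [he, PySem.List.pyRange_neg_one_eq_nil (by norm_num), List.foldl_nil,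
      bFinish_eval orig pos hpos _ _ _ _,
      eTailA_eq_eTailB orig dm moved hdm ((orig.length + 1) / 2) 0 (by omega)]
  | succ f ihf =>
    intro hfF hfG dm t used moved total hlen hmod hulen hused h4 hmlen h6 h7
    have hn2 : 2 * (f + 1) < orig.length := by omega
    have hcast1 : 2 * ((f + 1 : Nat) : Int) = ((2 * (f + 1) : Nat) : Int) := by push_cast; ring
    have hfs_eq : PySem.List.pyGetD dm (2 * ((f + 1 : Nat) : Int)) 0
        = PySem.List.pyGetD orig (2 * ((f + 1 : Nat) : Int)) 0 := by
      rw [hcast1, PySem.List.pyGetD_natCast, PySem.List.pyGetD_natCast]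
      exact h4 (f + 1) le_rfl
    set fs := PySem.List.pyGetD orig (2 * ((f + 1 : Nat) : Int)) 0 with hfsdef
    have hq : bQuery t 0 ((orig.length / 2 : Nat) : Int)
        (min ((f + 1 : Nat) : Int) ((orig.length / 2 : Nat) : Int)) fs
        = firstFit (capsF dm) 0 ((f + 1 : Nat) : Int) fs := by
      rw [bQuery_correct fs t _ _ _ _ hmod]
      congr 1
      omega
    have hrange : PySem.List.pyRange ((f + 1 : Nat) : Int) 0 (-1)
        = ((f + 1 : Nat) : Int) :: PySem.List.pyRange ((f : Nat) : Int) 0 (-1) := by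
      rw [PySem.List.pyRange_neg_one_cons (by push_cast; omega)]
      norm_num
    -- the "no move happens" transfer of the invariants
    have hskip : ∀ total' : Int,
        dcsLoop2 orig (dcsLoop1 orig dm (2 * ((f : Nat) : Int)) total').1
            (dcsLoop1 orig dm (2 * ((f : Nat) : Int)) total').2 0 0
          = bFinish orig pos
              ((PySem.List.pyRange ((f : Nat) : Int) 0 (-1)).foldl
                (bStep orig pos ((orig.length / 2 : Nat) : Int)) (some t, used, moved, total')) := by
      intro total'
      refine ihf (by omega) (by omega) dm t used moved total' hlen hmod hulen hused
        (fun k hk => h4 k (by omega)) hmlen ?_ (fun k hk => h7 k (by omega))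
      intro k hk
      by_cases hk1 : k = f + 1
      · subst hk1
        rw [h4 (f + 1) le_rfl, h7 (f + 1) le_rfl, if_neg (by simp)]
      · exact h6 k (by omega)
    by_cases hfspos : fs > 0
    · cases hff : firstFit (capsF dm) 0 ((f + 1 : Nat) : Int) fs with
      | none =>
        have hscan := dcsScan_none dm fs (f + 1) (f + 1) 0 (by omega) (by exact_mod_cast hff)
        have hstep : dcsLoop1 orig dm (2 * ((f + 1 : Nat) : Int)) total
            = dcsLoop1 orig dm (2 * ((f : Nat) : Int)) total := by
          conv_lhs => rw [dcsLoop1]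
          rw [dif_pos (by push_cast; omega)]
          simp only [hfs_eq, ← hfsdef, if_pos hfspos]
          rw [if_neg (by push_cast at hscan ⊢; omega),
            show 2 * ((f + 1 : Nat) : Int) - 2 = 2 * ((f : Nat) : Int) by push_cast; ring]
        have hbstep : bStep orig pos ((orig.length / 2 : Nat) : Int)
            (some t, used, moved, total) ((f + 1 : Nat) : Int)
            = (some t, used, moved, total) := by
          simp only [bStep, ← hfsdef, if_pos hfspos, hq, hff]
        rw [hstep, hrange, List.foldl_cons, hbstep, hskip total]
      | some g =>
        obtain ⟨hg0, hgf, hgcap⟩ :=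
          firstFit_some (capsF dm) fs (((f + 1 : Nat) : Int) - 0).toNat 0 _ g rfl hff
        set gN := g.toNat with hgNdef
        have hgNg : (gN : Int) = g := Int.toNat_of_nonneg hg0
        have hgNlt : gN < f + 1 := by omega
        have hgG : gN < orig.length / 2 := by omega
        have h2g1 : 2 * g + 1 = ((2 * gN + 1 : Nat) : Int) := by push_cast; omega
        have hscan : dcsScan dm (2 * ((f + 1 : Nat) : Int)) fs 1 = 2 * g + 1 := by
          have := dcsScan_some dm fs (f + 1) (f + 1) 0 g (by omega) (by exact_mod_cast hff)
          simpa using this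
        have hcapg : capsF dm g = PySem.List.pyGetD dm ((2 * gN + 1 : Nat) : Int) 0 := by
          unfold capsF
          rw [← h2g1]
        have hfid : PySem.Int.truncdiv (2 * ((f + 1 : Nat) : Int)) 2 = ((f + 1 : Nat) : Int) := by
          unfold PySem.Int.truncdiv
          rw [show 2 * ((f + 1 : Nat) : Int) = ((f + 1 : Nat) : Int) * 2 by ring]
          exact Int.mul_tdiv_cancel _ (by norm_num)
        have hslice : (PySem.List.slice orig (some 0) (some (2 * g + 1))).sum
            = aPrefix orig (2 * gN + 1) := by
          rw [h2g1, PySem.List.slice_zero_start, PySem.List.slice_to_natCast]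
          rfl
        set dmA := PySem.List.pySetD dm ((2 * (f + 1) : Nat) : Int) 0 with hdmAdef
        have hlenA : dmA.length = orig.length := by
          rw [hdmAdef, PySem.List.length_pySetD, hlen]
        have hdmAodd : ∀ j : Nat, j % 2 = 1 →
            PySem.List.pyGetD dmA ((j : Nat) : Int) 0 = PySem.List.pyGetD dm ((j : Nat) : Int) 0 := by
          intro j hj
          rw [hdmAdef, PySem.List.pyGetD_pySetD_natCast dm (2 * (f + 1)) j 0 0 (by omega),
            if_neg (by omega)]
        set dmB := PySem.List.pySetD dmA ((2 * gN + 1 : Nat) : Int)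
          (PySem.List.pyGetD dmA ((2 * gN + 1 : Nat) : Int) 0 - fs) with hdmBdef
        have hlenB : dmB.length = orig.length := by
          rw [hdmBdef, PySem.List.length_pySetD, hlenA]
        have hstep : dcsLoop1 orig dm (2 * ((f + 1 : Nat) : Int)) total
            = dcsLoop1 orig dmB (2 * ((f : Nat) : Int))
                (total + calculate_block_checksum
                  (aPrefix orig (2 * gN + 1) + PySem.List.pyGetD orig ((2 * gN + 1 : Nat) : Int) 0
                    - PySem.List.pyGetD dm ((2 * gN + 1 : Nat) : Int) 0)
                  fs ((f + 1 : Nat) : Int)) := by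
          conv_lhs => rw [dcsLoop1]
          rw [dif_pos (by push_cast; omega)]
          simp only [hfs_eq, ← hfsdef, if_pos hfspos, hscan]
          rw [if_pos ⟨by push_cast; omega, by rw [h2g1, ← hcapg]; exact hgcap⟩]
          rw [hslice, hfid, h2g1, hcast1]
          rw [show ((2 * (f + 1) : Nat) : Int) - 2 = 2 * ((f : Nat) : Int) by push_cast; ring]
        have hbstep : bStep orig pos ((orig.length / 2 : Nat) : Int)
            (some t, used, moved, total) ((f + 1 : Nat) : Int)
            = (some (bUpdate t 0 ((orig.length / 2 : Nat) : Int) g fs),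
               PySem.List.pySetD used g (PySem.List.pyGetD used g 0 + fs),
               PySem.List.pySetD moved ((f + 1 : Nat) : Int) true,
               total + calcChecksumB (PySem.List.pyGetD pos (2 * g + 1) 0
                 + PySem.List.pyGetD used g 0) fs ((f + 1 : Nat) : Int)) := by
          simp only [bStep, ← hfsdef, if_pos hfspos, hq, hff]
        have hposg : PySem.List.pyGetD pos (2 * g + 1) 0 = aPrefix orig (2 * gN + 1) := by
          rw [h2g1]
          exact hpos (2 * gN + 1) (by omega)
        have husedg : PySem.List.pyGetD used g 0
            = PySem.List.pyGetD orig ((2 * gN + 1 : Nat) : Int) 0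
              - PySem.List.pyGetD dm ((2 * gN + 1 : Nat) : Int) 0 := by
          rw [← hgNg, PySem.List.pyGetD_natCast, hused gN hgG]
          unfold capsF
          rw [show 2 * ((gN : Nat) : Int) + 1 = ((2 * gN + 1 : Nat) : Int) by push_cast; ring]
        have htot : total + calcChecksumB (PySem.List.pyGetD pos (2 * g + 1) 0
              + PySem.List.pyGetD used g 0) fs ((f + 1 : Nat) : Int)
            = total + calculate_block_checksum
                (aPrefix orig (2 * gN + 1) + PySem.List.pyGetD orig ((2 * gN + 1 : Nat) : Int) 0
                  - PySem.List.pyGetD dm ((2 * gN + 1 : Nat) : Int) 0)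
                fs ((f + 1 : Nat) : Int) := by
          rw [calcB_eq_calcA, hposg, husedg,
            show aPrefix orig (2 * gN + 1)
                + (PySem.List.pyGetD orig ((2 * gN + 1 : Nat) : Int) 0
                   - PySem.List.pyGetD dm ((2 * gN + 1 : Nat) : Int) 0)
              = aPrefix orig (2 * gN + 1) + PySem.List.pyGetD orig ((2 * gN + 1 : Nat) : Int) 0
                  - PySem.List.pyGetD dm ((2 * gN + 1 : Nat) : Int) 0 by ring]
        have hgIntG : g < ((orig.length / 2 : Nat) : Int) := by omega
        have hcapsB : ∀ x : Int, 0 ≤ x → x < ((orig.length / 2 : Nat) : Int) →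
            (if x = g then capsF dm x - fs else capsF dm x) = capsF dmB x := by
          intro x hx0 hxG
          have hxN : ((x.toNat : Nat) : Int) = x := Int.toNat_of_nonneg hx0
          have hxcast : 2 * x + 1 = ((2 * x.toNat + 1 : Nat) : Int) := by push_cast; omega
          unfold capsF
          rw [hdmBdef, hxcast,
            PySem.List.pyGetD_pySetD_natCast dmA (2 * gN + 1) (2 * x.toNat + 1) _ 0
              (by rw [hlenA]; omega),
            hdmAodd (2 * gN + 1) (by omega)]
          by_cases hxg : x = g
          · rw [if_pos hxg, if_pos (by omega), hxg, ← hgNdef]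
          · rw [if_neg hxg, if_neg (by omega)]
            exact (hdmAodd (2 * x.toNat + 1) (by omega)).symm
        have hmodB : Models (bUpdate t 0 ((orig.length / 2 : Nat) : Int) g fs) 0
            ((orig.length / 2 : Nat) : Int) (capsF dmB) :=
          models_congr _ _ _ _ _
            (bUpdate_models fs t 0 _ g (capsF dm) hmod hg0 hgIntG)
            (fun x hx0 hxG => hcapsB x hx0 hxG)
        have husedlenB : (PySem.List.pySetD used g (PySem.List.pyGetD used g 0 + fs)).length
            = orig.length / 2 := by
          rw [PySem.List.length_pySetD, hulen]
        have husedB : ∀ g' : Nat, g' < orig.length / 2 →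
            (PySem.List.pySetD used g (PySem.List.pyGetD used g 0 + fs)).getD g' 0
              = PySem.List.pyGetD orig (2 * (g' : Int) + 1) 0 - capsF dmB (g' : Int) := by
          intro g' hg'
          have hcB := (hcapsB (g' : Int) (by omega) (by omega)).symm
          rw [← PySem.List.pyGetD_natCast, ← hgNg,
            PySem.List.pyGetD_pySetD_natCast used gN g' _ 0 (by omega)]
          by_cases hgg : g' = gN
          · rw [if_pos hgg, hcB, if_pos (by omega), ← hgg,
              PySem.List.pyGetD_natCast, hused g' hg']
            ring
          · rw [if_neg hgg, hcB, if_neg (by omega),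
              PySem.List.pyGetD_natCast]
            exact hused g' hg' 
        have h4B : ∀ k : Nat, k ≤ f → dmB.getD (2 * k) 0 = orig.getD (2 * k) 0 := by
          intro k hk
          rw [← PySem.List.pyGetD_natCast dmB, hdmBdef,
            PySem.List.pyGetD_pySetD_natCast dmA (2 * gN + 1) (2 * k) _ 0 (by rw [hlenA]; omega),
            if_neg (by omega), hdmAdef,
            PySem.List.pyGetD_pySetD_natCast dm (2 * (f + 1)) (2 * k) 0 0 (by omega),
            if_neg (by omega), PySem.List.pyGetD_natCast]
          exact h4 k (by omega)
        have hmovB : ∀ k : Nat,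
            (PySem.List.pySetD moved ((f + 1 : Nat) : Int) true).getD k false
              = (if k = f + 1 then true else moved.getD k false) := by
          intro k
          rw [← PySem.List.pyGetD_natCast,
            PySem.List.pyGetD_pySetD_natCast moved (f + 1) k true false (by omega),
            PySem.List.pyGetD_natCast]
        have hmovlenB : (PySem.List.pySetD moved ((f + 1 : Nat) : Int) true).length
            = (orig.length + 1) / 2 := by
          rw [PySem.List.length_pySetD, hmlen]
        have h6B : ∀ k : Nat, f < k → dmB.getD (2 * k) 0
            = (if (PySem.List.pySetD moved ((f + 1 : Nat) : Int) true).getD k false then 0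
               else orig.getD (2 * k) 0) := by
          intro k hk
          rw [hmovB k,
            ← PySem.List.pyGetD_natCast dmB, hdmBdef,
            PySem.List.pyGetD_pySetD_natCast dmA (2 * gN + 1) (2 * k) _ 0 (by rw [hlenA]; omega),
            if_neg (by omega), hdmAdef,
            PySem.List.pyGetD_pySetD_natCast dm (2 * (f + 1)) (2 * k) 0 0 (by omega)]
          by_cases hk1 : k = f + 1
          · rw [if_pos (by omega), if_pos hk1]
            simp
          · rw [if_neg (by omega), if_neg hk1, PySem.List.pyGetD_natCast]
            exact h6 k (by omega)
        have h7B : ∀ k : Nat, k ≤ f →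
            (PySem.List.pySetD moved ((f + 1 : Nat) : Int) true).getD k false = false := by
          intro k hk
          rw [hmovB k, if_neg (by omega)]
          exact h7 k (by omega)
        rw [hstep, hrange, List.foldl_cons, hbstep, htot]
        exact ihf (by omega) (by omega) dmB _ _ _ _ hlenB hmodB husedlenB husedB h4B
          hmovlenB h6B h7B
    · have hstep : dcsLoop1 orig dm (2 * ((f + 1 : Nat) : Int)) total
          = dcsLoop1 orig dm (2 * ((f : Nat) : Int)) total := by
        conv_lhs => rw [dcsLoop1]
        rw [dif_pos (by push_cast; omega)]
        simp only [hfs_eq, ← hfsdef, if_neg hfspos]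
        rw [show 2 * ((f + 1 : Nat) : Int) - 2 = 2 * ((f : Nat) : Int) by push_cast; ring]
      have hbstep : bStep orig pos ((orig.length / 2 : Nat) : Int)
          (some t, used, moved, total) ((f + 1 : Nat) : Int)
          = (some t, used, moved, total) := by
        simp only [bStep, ← hfsdef, if_neg hfspos]
      rw [hstep, hrange, List.foldl_cons, hbstep, hskip total]


lemma replicate_getD_false (m k : Nat) : (List.replicate m false).getD k false = false := by
  by_cases h : k < m
  · rw [List.getD_replicate _ h]
  · rw [List.getD_eq_default _ _ (by simpa using by omega : (List.replicate m false).length ≤ k)]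

-- ===== VERDICT (by name: the statement is the Claim_ definition above) =====
theorem defragmented_compression_sum_spec : Claim_equal_defragmented_compression_sum := by
  unfold Claim_equal_defragmented_compression_sum
  intro disk_map _
  unfold Spec_defragmented_compression_sum
  have hposg := pos_getD disk_map
  unfold defragmented_compression_sum defragmented_compression_sum_alt
  simp only [PySem.List.len_eq, caps_length]
  have hF : PySem.Int.floordiv ((disk_map.length : Int) + 1) 2
      = (((disk_map.length + 1) / 2 : Nat) : Int) := by
    rw [show ((disk_map.length : Int) + 1) = ((disk_map.length + 1 : Nat) : Int) by push_cast; ring]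
    exact_mod_cast PySem.Int.floordiv_natCast (disk_map.length + 1) 2
  rw [hF]
  simp only [Int.toNat_natCast]
  by_cases hn2 : 2 ≤ disk_map.length
  · have hGpos : 0 < disk_map.length / 2 := by omega
    have hrp : (if PySem.Int.mod (disk_map.length : Int) 2 ≠ 0 then (disk_map.length : Int) - 1
        else (disk_map.length : Int) - 2)
        = 2 * (((disk_map.length + 1) / 2 - 1 : Nat) : Int) := by
      rw [PySem.Int.mod_eq_emod_of_pos (by norm_num)]
      by_cases hpar : disk_map.length % 2 = 0
      · rw [if_neg (by omega)]
        push_cast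
        omega
      · rw [if_pos (by omega)]
        push_cast
        omega
    rw [hrp, if_pos (show ((disk_map.length / 2 : Nat) : Int) > 0 by exact_mod_cast hGpos),
      show (((disk_map.length + 1) / 2 : Nat) : Int) - 1
        = (((disk_map.length + 1) / 2 - 1 : Nat) : Int) by push_cast; omega]
    have hmod0 : Models (bBuild ((PySem.List.pyRange 1 (disk_map.length : Int) 2).map
          (fun j => PySem.List.pyGetD disk_map j 0)) 0 ((disk_map.length / 2 : Nat) : Int)) 0
        ((disk_map.length / 2 : Nat) : Int) (capsF disk_map) := by
      apply models_congr _ _ _ _ _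
        (bBuild_models _ (((disk_map.length / 2 : Nat) : Int) - 0).toNat 0 _ rfl
          (by exact_mod_cast hGpos))
      intro x hx0 hxG
      have hxN : ((x.toNat : Nat) : Int) = x := Int.toNat_of_nonneg hx0
      rw [← hxN]
      exact caps_getD disk_map x.toNat (by omega)
    exact main_loop disk_map _ (fun j hj => hposg j hj)
      ((disk_map.length + 1) / 2 - 1) (by omega) (by omega) disk_map _
      (List.replicate (disk_map.length / 2) 0)
      (List.replicate ((disk_map.length + 1) / 2) false) 0 rfl hmod0
      (by simp)
      (fun g hg => by rw [List.getD_replicate _ hg]; unfold capsF; ring)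
      (fun k _ => rfl)
      (by simp)
      (fun k _ => by rw [replicate_getD_false]; simp)
      (fun k _ => replicate_getD_false _ _)
  · have hG0 : disk_map.length / 2 = 0 := by omega
    rw [hG0]
    have hrp0 : ¬ ((if PySem.Int.mod (disk_map.length : Int) 2 ≠ 0 then (disk_map.length : Int) - 1
        else (disk_map.length : Int) - 2) > 0) := by
      split_ifs <;> omega
    rw [dcsLoop1, dif_neg hrp0,
      if_neg (by norm_num : ¬ (((0 : Nat) : Int) > 0)),
      PySem.List.pyRange_neg_one_eq_nil (by push_cast; omega)]
    simp only [List.foldl_nil, Int.toNat_natCast, Nat.cast_zero, Int.toNat_zero]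
    have he := dcsLoop2_eval disk_map disk_map rfl ((disk_map.length + 1) / 2) 0 0 (by omega)
    simp only [Nat.cast_zero, mul_zero, Nat.mul_zero] at he
    rw [show aPrefix disk_map 0 = 0 from rfl] at he
    have hb := bFinish_eval disk_map _ (fun j hj => hposg j hj) none
      (List.replicate ((0 : Nat)) 0) (List.replicate ((disk_map.length + 1) / 2) false) 0
    rw [he, eTailA_eq_eTailB disk_map disk_map
      (List.replicate ((disk_map.length + 1) / 2) false)
      (fun k => by rw [replicate_getD_false]; simp) ((disk_map.length + 1) / 2) 0 (by omega)]
    exact hb.symm
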